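-- pv_equiv track=rewrite | github.com/pypi-data/pypi-mirror-278 | packages/chess-transformer/chess_transformer-0.1.41-py3-none-any.whl/chess_transformer/fen/_labels.py | merge_empties
-- ===== SOURCE A (Python) =====
-- from typing import Sequence, TypeAlias, Iterable
--
-- def merge_empties(row: Sequence[str | None]) -> Iterable[str]:
--   spaces = 0
--   for piece in row:
--     if piece is None:
--       spaces += 1
--     else:
--       if spaces > 0:
--         yield str(spaces)
--         spaces = 0
--       yield piece
--   if spaces > 0:
--     yield str(spaces)
-- ===== SOURCE B (Python) =====
-- from itertools import groupby
-- from typing import Sequence, Iterable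
--
-- def merge_empties(row: "Sequence[str | None]") -> "Iterable[str]":
--   for is_empty, group in groupby(row, key=lambda x: x is None):
--     if is_empty:
--       yield str(len(list(group)))
--     else:
--       yield from group
-- ===== Notes on version B (the rewrite author's own statement) =====
-- stated objective: idiomatic
-- what changed: Replaces the manual spaces counter and post-loop flush with itertools.groupby splitting the row into maximal runs, yielding the run length for empty runs and the pieces otherwise.
import Mathlib
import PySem

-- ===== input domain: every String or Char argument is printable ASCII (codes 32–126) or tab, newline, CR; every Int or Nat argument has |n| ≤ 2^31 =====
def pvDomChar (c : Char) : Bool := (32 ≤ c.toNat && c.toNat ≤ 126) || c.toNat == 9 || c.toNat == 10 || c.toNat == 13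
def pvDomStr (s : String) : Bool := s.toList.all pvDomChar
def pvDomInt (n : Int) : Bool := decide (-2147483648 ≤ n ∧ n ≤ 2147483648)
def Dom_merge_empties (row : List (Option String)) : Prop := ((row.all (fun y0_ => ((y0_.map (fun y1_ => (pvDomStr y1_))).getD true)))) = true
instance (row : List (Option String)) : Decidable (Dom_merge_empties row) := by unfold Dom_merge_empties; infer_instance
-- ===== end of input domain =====

-- B replaces A's running `spaces` counter and post-loop flush by splitting the row
-- into maximal runs (itertools.groupby) — idiomatic, same O(n) cost.

-- ===== PORT A =====
-- A's for-loop carrying the yielded output so far and the `spaces` counter;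
-- the base case is the post-loop flush `if spaces > 0: yield str(spaces)`.
def mergeEmptiesLoopA (row : List (Option String)) (out : List String) (spaces : Int) : List String :=
  match row with
  | [] => if spaces > 0 then out ++ [PySem.Int.toStr spaces] else out
  | none :: rest => mergeEmptiesLoopA rest out (spaces + 1)
  | some p :: rest =>
      mergeEmptiesLoopA rest (out ++ (if spaces > 0 then [PySem.Int.toStr spaces] else []) ++ [p]) 0

def merge_empties (row : List (Option String)) : List String :=
  mergeEmptiesLoopA row [] 0

-- ===== PORT B =====
-- B's groupby: each maximal run of None yields its length; pieces are yielded one by one.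
def merge_empties_alt (row : List (Option String)) : List String :=
  match row with
  | [] => []
  | none :: rest =>
      let run := rest.takeWhile Option.isNone
      PySem.Int.toStr (1 + (run.length : Int)) :: merge_empties_alt (rest.drop run.length)
  | some p :: rest => p :: merge_empties_alt rest
termination_by row.length
decreasing_by
  · simp
  · simp

-- ===== PRECONDITION & SPEC =====
def Spec_merge_empties (row : List (Option String)) (out : List String) : Prop := out = merge_empties_alt row
instance (row : List (Option String)) (out : List String) : Decidable (Spec_merge_empties row out) := by unfold Spec_merge_empties; infer_instance

-- ===== CLAIM (what is proved, stated in full; the proofs are below) =====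
def Claim_equal_merge_empties : Prop := ∀ (row : List (Option String)), Dom_merge_empties row → Spec_merge_empties row (merge_empties row)

-- ===== LEMMAS AND PROOFS =====

-- unfolding equations for the well-founded recursion of B's port
theorem alt_nil : merge_empties_alt [] = [] := by
  rw [merge_empties_alt]

theorem alt_some (p : String) (rest : List (Option String)) :
    merge_empties_alt (some p :: rest) = p :: merge_empties_alt rest := by
  rw [merge_empties_alt]

theorem alt_none (rest : List (Option String)) :
    merge_empties_alt (none :: rest) =
      PySem.Int.toStr (1 + ((rest.takeWhile Option.isNone).length : Int)) ::
        merge_empties_alt (rest.drop (rest.takeWhile Option.isNone).length) := by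
  rw [merge_empties_alt]

-- the accumulated output factors out of A's loop
theorem loopA_out (row : List (Option String)) :
    ∀ (out : List String) (spaces : Int),
      mergeEmptiesLoopA row out spaces = out ++ mergeEmptiesLoopA row [] spaces := by
  induction row with
  | nil =>
      intro out spaces
      simp only [mergeEmptiesLoopA]; split <;> simp
  | cons h t ih =>
      intro out spaces
      cases h with
      | none =>
          simp only [mergeEmptiesLoopA]
          exact ih out (spaces + 1)
      | some p =>
          simp only [mergeEmptiesLoopA]
          conv_lhs => rw [ih]
          conv_rhs => rw [ih]
          simp

-- main invariant, by strong induction on the row length: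
-- with no pending Nones A's loop is B; with s+1 pending Nones it emits the
-- count of the whole None-run and continues as B.
theorem loopA_main (n : ℕ) :
    ∀ row : List (Option String), row.length ≤ n →
      (mergeEmptiesLoopA row [] 0 = merge_empties_alt row) ∧
      (∀ s : ℕ,
        mergeEmptiesLoopA row [] ((s : Int) + 1) =
          PySem.Int.toStr ((s : Int) + 1 + ((row.takeWhile Option.isNone).length : Int)) ::
            merge_empties_alt (row.drop (row.takeWhile Option.isNone).length)) := by
  induction n with
  | zero =>
      intro row hr
      have : row = [] := List.eq_nil_of_length_eq_zero (Nat.le_zero.mp hr)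
      subst this
      refine ⟨by simp [mergeEmptiesLoopA, alt_nil], ?_⟩
      intro s
      have hpos : (0:Int) < (s : Int) + 1 := by positivity
      simp [mergeEmptiesLoopA, alt_nil, hpos]
  | succ n ih =>
      intro row hr
      match row with
      | [] => exact ih [] (by simp)
      | some p :: rest =>
          have hrest : rest.length ≤ n := by simp at hr; omega
          constructor
          · simp only [mergeEmptiesLoopA]
            rw [loopA_out]
            simp [(ih rest hrest).1, alt_some]
          · intro s
            have hpos : (0:Int) < (s : Int) + 1 := by positivity
            simp only [mergeEmptiesLoopA, if_pos hpos]
            rw [loopA_out]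
            simp [(ih rest hrest).1, alt_some, List.takeWhile]
      | none :: rest =>
          have hrest : rest.length ≤ n := by simp at hr; omega
          have htw : (List.takeWhile Option.isNone (none :: rest)) =
              none :: rest.takeWhile Option.isNone := by simp [List.takeWhile]
          constructor
          · simp only [mergeEmptiesLoopA]
            have h0 := ((ih rest hrest).2 0)
            simp only [Nat.cast_zero, zero_add] at h0
            norm_num
            rw [h0, alt_none]
          · intro s
            have h1 := ((ih rest hrest).2 (s + 1))
            simp only [mergeEmptiesLoopA]
            push_cast at h1 ⊢
            have harg : (s : Int) + 1 + 1 = (s : Int) + 1 + 1 := rfl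
            rw [show ((s : Int) + 1 + 1) = ((s : Int) + 1 + 1) from rfl] at h1
            rw [h1]
            simp [htw]
            ring_nf

-- ===== VERDICT (by name: the statement is the Claim_ definition above) =====
theorem merge_empties_spec : Claim_equal_merge_empties := by
  intro row _
  unfold Spec_merge_empties merge_empties
  exact (loopA_main row.length row (le_refl _)).1
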